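-- pv_equiv track=rewrite | github.com/lias-laboratory/thesaurusbt | thesaurusBT/experiments/lib/functions.py | search_word_in_dict_func
-- ===== SOURCE A (Python) =====
-- def search_word_in_dict_func(word,dico_families):
--     res= {"prediction": [], "ambigious": []}
--     for key in dico_families.keys():
--         if word in dico_families[key]['ambigious_words']:
--             res["ambigious"].append(key)
--     for key in dico_families.keys():
--         if word in dico_families[key]['ambigious_words_plural']:
--             res["ambigious"].append(key)
--     for key in dico_families.keys():
--         if word in dico_families[key]['keywords']:
--             res["prediction"].append(key)
--     for key in dico_families.keys():
--         if word in dico_families[key]['keywords_plural']: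
--             res["prediction"].append(key)
--     return res
-- ===== SOURCE B (Python) =====
-- def search_word_in_dict_func(word, dico_families):
--     # Single pass over the families with four accumulators instead of four scans of the dict.
--     aw, awp, kw, kwp = [], [], [], []
--     for key, fam in dico_families.items():
--         if word in fam['ambigious_words']:
--             aw.append(key)
--         if word in fam['ambigious_words_plural']:
--             awp.append(key)
--         if word in fam['keywords']:
--             kw.append(key)
--         if word in fam['keywords_plural']:
--             kwp.append(key)
--     return {"prediction": kw + kwp, "ambigious": aw + awp}
-- ===== Notes on version B (the rewrite author's own statement) =====
-- stated objective: alternative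
-- what changed: One pass over dico_families.items() maintaining four accumulator lists, concatenated at the end, instead of four separate full scans each re-looking up dico_families[key].
import Mathlib
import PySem

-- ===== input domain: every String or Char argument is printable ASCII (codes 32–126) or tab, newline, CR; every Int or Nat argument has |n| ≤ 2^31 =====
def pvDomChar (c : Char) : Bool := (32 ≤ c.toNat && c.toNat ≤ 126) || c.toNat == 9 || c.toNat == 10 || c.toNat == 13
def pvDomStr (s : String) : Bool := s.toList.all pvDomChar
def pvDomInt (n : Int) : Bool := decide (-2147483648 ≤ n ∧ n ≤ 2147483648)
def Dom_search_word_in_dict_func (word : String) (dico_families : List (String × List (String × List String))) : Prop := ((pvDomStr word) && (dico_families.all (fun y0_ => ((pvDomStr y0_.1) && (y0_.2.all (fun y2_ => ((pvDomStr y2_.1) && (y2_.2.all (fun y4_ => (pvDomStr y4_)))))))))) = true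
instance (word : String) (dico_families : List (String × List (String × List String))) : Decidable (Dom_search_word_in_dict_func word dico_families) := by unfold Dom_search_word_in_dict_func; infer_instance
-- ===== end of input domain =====

-- B replaces A's four full scans of the dict (each re-looking up dico_families[key]) by a
-- single pass over the items with four accumulator lists; same result, different decomposition.


-- ===== PORT A =====
-- literal transliteration: res = {"prediction": [], "ambigious": []}; four loops over keys(),
-- each looking the family up again by key and appending to the corresponding res entry.
def search_word_in_dict_func (word : String) (dico_families : List (String × List (String × List String))) : List (String × List String) :=
  let d : PySem.Dict String (List (String × List String)) := ⟨dico_families⟩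
  let res : PySem.Dict String (List String) := ⟨[("prediction", []), ("ambigious", [])]⟩
  let res := d.keys.foldl (fun r key =>
      if word ∈ PySem.Dict.getD (⟨d.getD key []⟩ : PySem.Dict String (List String)) "ambigious_words" [] then
        r.modify "ambigious" [] (fun v => v ++ [key]) else r) res
  let res := d.keys.foldl (fun r key =>
      if word ∈ PySem.Dict.getD (⟨d.getD key []⟩ : PySem.Dict String (List String)) "ambigious_words_plural" [] then
        r.modify "ambigious" [] (fun v => v ++ [key]) else r) res
  let res := d.keys.foldl (fun r key =>
      if word ∈ PySem.Dict.getD (⟨d.getD key []⟩ : PySem.Dict String (List String)) "keywords" [] then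
        r.modify "prediction" [] (fun v => v ++ [key]) else r) res
  let res := d.keys.foldl (fun r key =>
      if word ∈ PySem.Dict.getD (⟨d.getD key []⟩ : PySem.Dict String (List String)) "keywords_plural" [] then
        r.modify "prediction" [] (fun v => v ++ [key]) else r) res
  res.items

-- ===== PORT B =====
-- single pass over the items with four accumulators (aw, awp, kw, kwp), concatenated at the end.
def search_word_in_dict_func_alt (word : String) (dico_families : List (String × List (String × List String))) : List (String × List String) :=
  let acc := dico_families.foldl
    (fun (acc : List String × List String × List String × List String) kv =>
      (if word ∈ PySem.Dict.getD (⟨kv.2⟩ : PySem.Dict String (List String)) "ambigious_words" [] then acc.1 ++ [kv.1] else acc.1,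
       if word ∈ PySem.Dict.getD (⟨kv.2⟩ : PySem.Dict String (List String)) "ambigious_words_plural" [] then acc.2.1 ++ [kv.1] else acc.2.1,
       if word ∈ PySem.Dict.getD (⟨kv.2⟩ : PySem.Dict String (List String)) "keywords" [] then acc.2.2.1 ++ [kv.1] else acc.2.2.1,
       if word ∈ PySem.Dict.getD (⟨kv.2⟩ : PySem.Dict String (List String)) "keywords_plural" [] then acc.2.2.2 ++ [kv.1] else acc.2.2.2))
    ([], [], [], [])
  [("prediction", acc.2.2.1 ++ acc.2.2.2), ("ambigious", acc.1 ++ acc.2.1)]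

-- ===== PRECONDITION & SPEC =====
-- Pre_ requires (i) distinct outer keys — the association list encodes a Python dict, whose keys
-- are necessarily unique — and (ii) every family dict to carry the four fields; on a family
-- missing a field Python A raises KeyError (it never returns there).
def Pre_search_word_in_dict_func (word : String) (dico_families : List (String × List (String × List String))) : Prop :=
  (dico_families.map Prod.fst).Nodup ∧
  ∀ kv ∈ dico_families,
    "ambigious_words" ∈ kv.2.map Prod.fst ∧ "ambigious_words_plural" ∈ kv.2.map Prod.fst ∧
    "keywords" ∈ kv.2.map Prod.fst ∧ "keywords_plural" ∈ kv.2.map Prod.fst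
instance (word : String) (dico_families : List (String × List (String × List String))) : Decidable (Pre_search_word_in_dict_func word dico_families) := by unfold Pre_search_word_in_dict_func; infer_instance

def pvWitness_search_word_in_dict_func : String × (List (String × List (String × List String))) :=
  ("cat", [("fam1", [("ambigious_words", ["cat"]), ("ambigious_words_plural", []), ("keywords", ["dog"]), ("keywords_plural", [])])])

def Spec_search_word_in_dict_func (word : String) (dico_families : List (String × List (String × List String))) (out : List (String × List String)) : Prop := out = search_word_in_dict_func_alt word dico_families
instance (word : String) (dico_families : List (String × List (String × List String))) (out : List (String × List String)) : Decidable (Spec_search_word_in_dict_func word dico_families out) := by unfold Spec_search_word_in_dict_func; infer_instance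

-- ===== CLAIM (what is proved, stated in full; the proofs are below) =====
def Claim_equal_search_word_in_dict_func : Prop := ∀ (word : String) (dico_families : List (String × List (String × List String))), Dom_search_word_in_dict_func word dico_families → Pre_search_word_in_dict_func word dico_families → Spec_search_word_in_dict_func word dico_families (search_word_in_dict_func word dico_families)

-- ===== LEMMAS AND PROOFS =====

-- membership test A performs for field f on the family value vs
def pvCond (word f : String) (vs : List (String × List String)) : Bool :=
  decide (word ∈ PySem.Dict.getD (⟨vs⟩ : PySem.Dict String (List String)) f [])

-- A's loop that appends to res["ambigious"], on a res of the fixed two-entry shape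
theorem fold_amb (word f : String) (look : String → List (String × List String)) (l : List String)
    (p a : List String) :
    l.foldl (fun r key =>
        if word ∈ PySem.Dict.getD (⟨look key⟩ : PySem.Dict String (List String)) f [] then
          PySem.Dict.modify r "ambigious" [] (fun v => v ++ [key]) else r)
      ⟨[("prediction", p), ("ambigious", a)]⟩
      = ⟨[("prediction", p), ("ambigious", a ++ l.filter (fun k => pvCond word f (look k)))]⟩ := by
  induction l generalizing a with
  | nil => simp
  | cons x xs ih =>
    by_cases h : word ∈ PySem.Dict.getD (⟨look x⟩ : PySem.Dict String (List String)) f []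
    · have hmod : (PySem.Dict.modify (⟨[("prediction", p), ("ambigious", a)]⟩ : PySem.Dict String (List String)) "ambigious" [] (fun v => v ++ [x]))
          = ⟨[("prediction", p), ("ambigious", a ++ [x])]⟩ := by
        simp [PySem.Dict.modify, PySem.Dict.getD, PySem.Dict.get?, PySem.Dict.insert]
      simp only [List.foldl_cons]
      rw [if_pos h, hmod, ih]
      simp [pvCond, h]
    · simp only [List.foldl_cons]
      rw [if_neg h, ih]
      simp [pvCond, h]

-- A's loop that appends to res["prediction"]
theorem fold_pred (word f : String) (look : String → List (String × List String)) (l : List String)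
    (p a : List String) :
    l.foldl (fun r key =>
        if word ∈ PySem.Dict.getD (⟨look key⟩ : PySem.Dict String (List String)) f [] then
          PySem.Dict.modify r "prediction" [] (fun v => v ++ [key]) else r)
      ⟨[("prediction", p), ("ambigious", a)]⟩
      = ⟨[("prediction", p ++ l.filter (fun k => pvCond word f (look k))), ("ambigious", a)]⟩ := by
  induction l generalizing p with
  | nil => simp
  | cons x xs ih =>
    by_cases h : word ∈ PySem.Dict.getD (⟨look x⟩ : PySem.Dict String (List String)) f []
    · have hmod : (PySem.Dict.modify (⟨[("prediction", p), ("ambigious", a)]⟩ : PySem.Dict String (List String)) "prediction" [] (fun v => v ++ [x]))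
          = ⟨[("prediction", p ++ [x]), ("ambigious", a)]⟩ := by
        simp [PySem.Dict.modify, PySem.Dict.getD, PySem.Dict.get?, PySem.Dict.insert]
      simp only [List.foldl_cons]
      rw [if_pos h, hmod, ih]
      simp [pvCond, h]
    · simp only [List.foldl_cons]
      rw [if_neg h, ih]
      simp [pvCond, h]

-- with distinct keys, the re-lookup A performs returns the family's own value
theorem lookup_self (dico : List (String × List (String × List String)))
    (hnd : (dico.map Prod.fst).Nodup) {kv : String × List (String × List String)} (hkv : kv ∈ dico) :
    PySem.Dict.getD (⟨dico⟩ : PySem.Dict String (List (String × List String))) kv.1 [] = kv.2 := by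
  refine PySem.Dict.getD_of_mem_items _ ?_ ?_ _
  · exact hkv
  · simpa [PySem.Dict.keys] using hnd

-- A's filtered key list for a field f equals "filter the items, then project to keys"
theorem keys_filter_eq (word f : String) (dico : List (String × List (String × List String)))
    (hnd : (dico.map Prod.fst).Nodup) :
    (dico.map Prod.fst).filter
        (fun k => pvCond word f (PySem.Dict.getD (⟨dico⟩ : PySem.Dict String (List (String × List String))) k []))
      = (dico.filter (fun kv => pvCond word f kv.2)).map Prod.fst := by
  rw [List.filter_map]
  congr 1
  apply List.filter_congr
  intro kv hkv
  simp only [Function.comp]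
  rw [lookup_self dico hnd hkv]

-- B's single pass computes the four filtered key lists at once
theorem alt_fold (word : String) (dico : List (String × List (String × List String)))
    (aw awp kw kwp : List String) :
    dico.foldl
      (fun (acc : List String × List String × List String × List String) kv =>
        (if word ∈ PySem.Dict.getD (⟨kv.2⟩ : PySem.Dict String (List String)) "ambigious_words" [] then acc.1 ++ [kv.1] else acc.1,
         if word ∈ PySem.Dict.getD (⟨kv.2⟩ : PySem.Dict String (List String)) "ambigious_words_plural" [] then acc.2.1 ++ [kv.1] else acc.2.1,
         if word ∈ PySem.Dict.getD (⟨kv.2⟩ : PySem.Dict String (List String)) "keywords" [] then acc.2.2.1 ++ [kv.1] else acc.2.2.1,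
         if word ∈ PySem.Dict.getD (⟨kv.2⟩ : PySem.Dict String (List String)) "keywords_plural" [] then acc.2.2.2 ++ [kv.1] else acc.2.2.2))
      (aw, awp, kw, kwp)
    = (aw ++ (dico.filter (fun kv => pvCond word "ambigious_words" kv.2)).map Prod.fst,
       awp ++ (dico.filter (fun kv => pvCond word "ambigious_words_plural" kv.2)).map Prod.fst,
       kw ++ (dico.filter (fun kv => pvCond word "keywords" kv.2)).map Prod.fst,
       kwp ++ (dico.filter (fun kv => pvCond word "keywords_plural" kv.2)).map Prod.fst) := by
  induction dico generalizing aw awp kw kwp with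
  | nil => simp
  | cons x xs ih =>
    simp only [List.foldl_cons, List.filter_cons, ih, pvCond]
    by_cases h1 : word ∈ PySem.Dict.getD (⟨x.2⟩ : PySem.Dict String (List String)) "ambigious_words" [] <;>
    by_cases h2 : word ∈ PySem.Dict.getD (⟨x.2⟩ : PySem.Dict String (List String)) "ambigious_words_plural" [] <;>
    by_cases h3 : word ∈ PySem.Dict.getD (⟨x.2⟩ : PySem.Dict String (List String)) "keywords" [] <;>
    by_cases h4 : word ∈ PySem.Dict.getD (⟨x.2⟩ : PySem.Dict String (List String)) "keywords_plural" [] <;>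
    simp [h1, h2, h3, h4]

-- ===== VERDICT (by name: the statement is the Claim_ definition above) =====
theorem search_word_in_dict_func_spec : Claim_equal_search_word_in_dict_func := by
  intro word dico _hdom hpre
  obtain ⟨hnd, _⟩ := hpre
  unfold Spec_search_word_in_dict_func search_word_in_dict_func search_word_in_dict_func_alt
  simp only [PySem.Dict.keys, alt_fold]
  rw [fold_amb, fold_amb, fold_pred, fold_pred]
  simp only [List.nil_append,
    keys_filter_eq word "ambigious_words" dico hnd,
    keys_filter_eq word "ambigious_words_plural" dico hnd,
    keys_filter_eq word "keywords" dico hnd,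
    keys_filter_eq word "keywords_plural" dico hnd]
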